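-- pv_equiv track=rewrite | github.com/maniczko/kindleMaster | pymupdf_chess_extractor.py | _get_css_font_family
-- ===== SOURCE A (Python) =====
-- def _get_css_font_family(pdf_font_name: str) -> str:
--     """Map PDF font names to CSS font families."""
--     font_lower = pdf_font_name.lower()
--
--     # Skip chess fonts - they'll be rendered as images
--     if any(x in font_lower for x in ['chess', 'merida', 'skak', 'alpha', 'leipzig']):
--         return "sans-serif"
--
--     # Common font mappings
--     if any(x in font_lower for x in ['aptos', 'arial', 'helvetica']):
--         return "Arial, Helvetica, sans-serif"
--     if any(x in font_lower for x in ['times', 'georgia', 'palatino']):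
--         return "Georgia, 'Times New Roman', serif"
--     if any(x in font_lower for x in ['courier', 'mono']):
--         return "'Courier New', Courier, monospace"
--     if any(x in font_lower for x in ['calibri']):
--         return "Calibri, 'Segoe UI', sans-serif"
--
--     return "Georgia, 'Times New Roman', serif"
-- ===== SOURCE B (Python) =====
-- _KEYWORD_GROUP = {
--     'chess': 0, 'merida': 0, 'skak': 0, 'alpha': 0, 'leipzig': 0,
--     'aptos': 1, 'arial': 1, 'helvetica': 1,
--     'times': 2, 'georgia': 2, 'palatino': 2,
--     'courier': 3, 'mono': 3,
--     'calibri': 4,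
-- }
--
-- _FAMILIES = [
--     "sans-serif",
--     "Arial, Helvetica, sans-serif",
--     "Georgia, 'Times New Roman', serif",
--     "'Courier New', Courier, monospace",
--     "Calibri, 'Segoe UI', sans-serif",
--     "Georgia, 'Times New Roman', serif",
-- ]
--
-- def _get_css_font_family(pdf_font_name: str) -> str:
--     font_lower = pdf_font_name.lower()
--     best = 5
--     for kw, group in _KEYWORD_GROUP.items():
--         if group < best and kw in font_lower:
--             best = group
--     return _FAMILIES[best]
-- ===== Notes on version B (the rewrite author's own statement) =====
-- stated objective: alternative
-- what changed: Replaces the early-return if/any cascade over keyword groups by a single full pass over a flat keyword->priority map that accumulates the minimum matched priority, then indexes a family array (default priority 5 maps to the serif default).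
import Mathlib
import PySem

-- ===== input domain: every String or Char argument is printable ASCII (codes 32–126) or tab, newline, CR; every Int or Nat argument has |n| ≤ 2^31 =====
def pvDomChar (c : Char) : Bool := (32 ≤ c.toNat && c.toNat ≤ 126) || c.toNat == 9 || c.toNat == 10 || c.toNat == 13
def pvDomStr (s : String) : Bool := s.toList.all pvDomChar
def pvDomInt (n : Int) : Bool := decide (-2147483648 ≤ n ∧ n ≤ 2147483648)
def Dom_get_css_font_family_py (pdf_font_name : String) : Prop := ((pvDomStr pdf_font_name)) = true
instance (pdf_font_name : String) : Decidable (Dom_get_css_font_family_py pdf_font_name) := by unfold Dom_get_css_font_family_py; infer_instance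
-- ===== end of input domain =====

-- B replaces A's early-return if/any cascade by one full pass over a flat keyword→priority map
-- accumulating the minimum matched priority, then indexing a family array (objective: alternative).

-- ===== PORT A =====
def get_css_font_family_py (pdf_font_name : String) : String :=
  let font_lower := PySem.Str.lower pdf_font_name
  if ["chess", "merida", "skak", "alpha", "leipzig"].any (fun x => PySem.Str.isIn x font_lower) then
    "sans-serif"
  else if ["aptos", "arial", "helvetica"].any (fun x => PySem.Str.isIn x font_lower) then
    "Arial, Helvetica, sans-serif"
  else if ["times", "georgia", "palatino"].any (fun x => PySem.Str.isIn x font_lower) then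
    "Georgia, 'Times New Roman', serif"
  else if ["courier", "mono"].any (fun x => PySem.Str.isIn x font_lower) then
    "'Courier New', Courier, monospace"
  else if ["calibri"].any (fun x => PySem.Str.isIn x font_lower) then
    "Calibri, 'Segoe UI', sans-serif"
  else
    "Georgia, 'Times New Roman', serif"

-- ===== PORT B =====
-- flat keyword → priority-group map (Python dict, insertion order)
def pvKeywordGroup : List (String × Nat) :=
  [("chess", 0), ("merida", 0), ("skak", 0), ("alpha", 0), ("leipzig", 0),
   ("aptos", 1), ("arial", 1), ("helvetica", 1),
   ("times", 2), ("georgia", 2), ("palatino", 2),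
   ("courier", 3), ("mono", 3),
   ("calibri", 4)]

def pvFamilies : List String :=
  ["sans-serif",
   "Arial, Helvetica, sans-serif",
   "Georgia, 'Times New Roman', serif",
   "'Courier New', Courier, monospace",
   "Calibri, 'Segoe UI', sans-serif",
   "Georgia, 'Times New Roman', serif"]

-- Python loop body: if group < best and kw in font_lower: best = group
def pvStep (font_lower : String) (best : Nat) (p : String × Nat) : Nat :=
  if p.2 < best ∧ PySem.Str.isIn p.1 font_lower = true then p.2 else best

def get_css_font_family_py_alt (pdf_font_name : String) : String :=
  let font_lower := PySem.Str.lower pdf_font_name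
  let best := pvKeywordGroup.foldl (pvStep font_lower) 5
  pvFamilies.getD best ""

-- ===== PRECONDITION & SPEC =====
def Spec_get_css_font_family_py (pdf_font_name : String) (out : String) : Prop := out = get_css_font_family_py_alt pdf_font_name
instance (pdf_font_name : String) (out : String) : Decidable (Spec_get_css_font_family_py pdf_font_name out) := by unfold Spec_get_css_font_family_py; infer_instance

-- ===== CLAIM (what is proved, stated in full; the proofs are below) =====
def Claim_equal_get_css_font_family_py : Prop := ∀ (pdf_font_name : String), Dom_get_css_font_family_py pdf_font_name → Spec_get_css_font_family_py pdf_font_name (get_css_font_family_py pdf_font_name)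

-- ===== LEMMAS AND PROOFS =====

-- once the accumulator is ≤ every group index in the tail, the fold leaves it unchanged
theorem pvFold_const (f : String) (g b : Nat) (h : b ≤ g) (kws : List String) :
    (kws.map (fun k => (k, g))).foldl (pvStep f) b = b := by
  induction kws with
  | nil => rfl
  | cons k rest ih =>
    simp only [List.map, List.foldl]
    rw [show pvStep f b (k, g) = b from if_neg (fun hc => absurd hc.1 (Nat.not_lt.2 h))]
    exact ih

-- folding one keyword group: the accumulator drops to g iff g < b and some keyword matches
theorem pvFold_group (f : String) (g : Nat) (kws : List String) (b : Nat) :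
    (kws.map (fun k => (k, g))).foldl (pvStep f) b =
      if g < b ∧ kws.any (fun x => PySem.Str.isIn x f) = true then g else b := by
  induction kws generalizing b with
  | nil => simp
  | cons k rest ih =>
    simp only [List.map, List.foldl, List.any_cons]
    by_cases hc : g < b ∧ PySem.Str.isIn k f = true
    · rw [show pvStep f b (k, g) = g from if_pos hc,
          pvFold_const f g g (le_refl g) rest,
          if_pos ⟨hc.1, by rw [hc.2, Bool.true_or]⟩]
    · rw [show pvStep f b (k, g) = b from if_neg hc, ih b]
      by_cases hb : g < b
      · have hk : PySem.Str.isIn k f = false := by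
          cases hik : PySem.Str.isIn k f
          · rfl
          · exact absurd ⟨hb, hik⟩ hc
        simp only [hk, Bool.false_or]
      · rw [if_neg (fun hh => hb hh.1), if_neg (fun hh => hb hh.1)]

-- ===== VERDICT (by name: the statement is the Claim_ definition above) =====
theorem get_css_font_family_py_spec : Claim_equal_get_css_font_family_py := by
  intro s _
  unfold Spec_get_css_font_family_py get_css_font_family_py get_css_font_family_py_alt
  set f := PySem.Str.lower s with hf
  have hsplit : pvKeywordGroup =
      (["chess", "merida", "skak", "alpha", "leipzig"].map (fun k => (k, (0:Nat)))) ++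
      (["aptos", "arial", "helvetica"].map (fun k => (k, (1:Nat)))) ++
      (["times", "georgia", "palatino"].map (fun k => (k, (2:Nat)))) ++
      (["courier", "mono"].map (fun k => (k, (3:Nat)))) ++
      (["calibri"].map (fun k => (k, (4:Nat)))) := rfl
  rw [hsplit]
  simp only [List.foldl_append]
  rw [pvFold_group, pvFold_group, pvFold_group, pvFold_group, pvFold_group]
  generalize (["chess", "merida", "skak", "alpha", "leipzig"].any (fun x => PySem.Str.isIn x f)) = a0
  generalize (["aptos", "arial", "helvetica"].any (fun x => PySem.Str.isIn x f)) = a1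
  generalize (["times", "georgia", "palatino"].any (fun x => PySem.Str.isIn x f)) = a2
  generalize (["courier", "mono"].any (fun x => PySem.Str.isIn x f)) = a3
  generalize (["calibri"].any (fun x => PySem.Str.isIn x f)) = a4
  cases a0 <;> cases a1 <;> cases a2 <;> cases a3 <;> cases a4 <;> decide
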